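-- pv_equiv track=rewrite | github.com/nimrodmls/huji-cs-intro | week7/assignment/ex7.py | _internal_compare_2d_lists
-- ===== SOURCE A (Python) =====
-- from typing import Any, List
--
-- def _compare_1d_lists(l1: List[int], l2: List[int], index: int) -> bool:
--     """
--     Internal function for compare_2d_lists.
--     The function compares 1 dimensional lists of ints.
--     """
--     # Lists are not of the same length, they're obviously not the same
--     if len(l1) != len(l2):
--         return False
--
--     # We reached the end, great success
--     # Getting here means that the length of both lists are the same
--     if len(l1) == index:
--         return True
--
--     if l1[index] == l2[index]:
--         # If the items are the same, continue for the next items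
--         return _compare_1d_lists(l1, l2, index+1)
--     else:
--         # One different element is enough to sell the rights to the
--         # songs we don't have, wrap our instruments and go back to Netanya
--         return False
--
-- def _internal_compare_2d_lists(l1: List[List[int]], l2: List[List[int]], index: int) -> bool:
--     """
--     Internal function for compare_2d_lists.
--     The function calls for _compare_1d_lists for every pair of nested list in the given lists.
--     """
--     if 0 == index:
--         return True
--     # Actually comparing
--     result = _compare_1d_lists(l1[index-1], l2[index-1], 0)
--     if result:
--         # Continue for the next lists if this one is okay
--         return _internal_compare_2d_lists(l1, l2, index-1)
--     else:
--         return False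
-- ===== SOURCE B (Python) =====
-- def _internal_compare_2d_lists(l1, l2, index):
--     """Iterative re-implementation: walk the rows index-1 .. 0 (descending,
--     matching the recursion's order) in one loop, comparing each row pair
--     with a length check + zip scan instead of a recursive helper."""
--     for i in range(index, 0, -1):
--         r1 = l1[i - 1]
--         r2 = l2[i - 1]
--         if len(r1) != len(r2) or any(a != b for a, b in zip(r1, r2)):
--             return False
--     return True
-- ===== Notes on version B (the rewrite author's own statement) =====
-- stated objective: simpler
-- what changed: Replaced the pair of recursive functions by a single iterative loop over the rows (descending, preserving the original check order) with an inlined length-check + zip scan per row instead of the recursive 1D helper.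
-- outside the precondition, e.g. on _internal_compare_2d_lists([[1], [2]], [[9], [2]], -1): A returns False, B returns True
import Mathlib
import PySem

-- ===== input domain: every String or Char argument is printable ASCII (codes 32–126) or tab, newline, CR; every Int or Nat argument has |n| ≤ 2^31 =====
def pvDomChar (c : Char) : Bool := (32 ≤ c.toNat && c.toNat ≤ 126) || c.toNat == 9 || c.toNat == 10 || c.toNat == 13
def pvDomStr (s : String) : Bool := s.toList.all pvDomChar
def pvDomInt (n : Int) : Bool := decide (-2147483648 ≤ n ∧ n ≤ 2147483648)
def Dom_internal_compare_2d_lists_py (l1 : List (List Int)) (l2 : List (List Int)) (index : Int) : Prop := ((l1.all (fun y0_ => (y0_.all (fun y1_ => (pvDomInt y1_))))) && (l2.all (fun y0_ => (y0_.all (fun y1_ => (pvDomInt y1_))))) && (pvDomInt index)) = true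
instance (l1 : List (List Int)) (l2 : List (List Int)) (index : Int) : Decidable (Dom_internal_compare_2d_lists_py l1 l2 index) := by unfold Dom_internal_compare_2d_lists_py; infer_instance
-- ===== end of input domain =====

-- B replaces the two recursive helpers by one iterative descending loop with an inlined row check ("simpler").

-- ===== PORT A =====
-- _compare_1d_lists: always called with index 0 and recursing to index+1, so a Nat index is exact.
def compare1dA (r1 r2 : List Int) (index : Nat) : Bool :=
  if r1.length ≠ r2.length then false
  else if r1.length = index then true
  else
    match h1 : PySem.List.pyGet? r1 (index : Int), PySem.List.pyGet? r2 (index : Int) with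
    | some a, some b => if a = b then compare1dA r1 r2 (index + 1) else false
    | _, _ => false  -- unreachable from A's calls (index stays < length); Python would raise IndexError
  termination_by r1.length - index
  decreasing_by
    rw [PySem.List.pyGet?_natCast] at h1
    have := (List.getElem?_eq_some_iff.mp h1).1
    omega

def internal_compare_2d_lists_py (l1 : List (List Int)) (l2 : List (List Int)) (index : Int) : Bool :=
  if 0 = index then true
  else
    -- l1[index-1] / l2[index-1]: Python raises IndexError when a lookup fails (excluded by Pre_)
    if h : (PySem.List.pyGet? l1 (index - 1)).isSome ∧ (PySem.List.pyGet? l2 (index - 1)).isSome then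
      if compare1dA ((PySem.List.pyGet? l1 (index - 1)).get h.1)
          ((PySem.List.pyGet? l2 (index - 1)).get h.2) 0 then
        internal_compare_2d_lists_py l1 l2 (index - 1)
      else false
    else false
  termination_by (index + l1.length).toNat
  decreasing_by
    have hin : PySem.Raise.InRange l1.length (index - 1) := by
      by_contra hc
      rw [← PySem.List.pyGet?_eq_none_iff (xs := l1)] at hc
      rw [hc] at h
      simp at h
    simp [PySem.Raise.InRange] at hin
    omega

-- ===== PORT B =====
-- any(a != b for a, b in zip(r1, r2))
def pyAnyNe (r1 r2 : List Int) : Bool := (r1.zip r2).any (fun p => p.1 != p.2)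

-- the body of B's "for i in range(index, 0, -1)" loop, with early return as recursion over the range list
def bLoop (l1 l2 : List (List Int)) : List Int → Bool
  | [] => true
  | i :: rest =>
    match PySem.List.pyGet? l1 (i - 1), PySem.List.pyGet? l2 (i - 1) with
    | some r1, some r2 =>
        if (r1.length != r2.length) || pyAnyNe r1 r2 then false else bLoop l1 l2 rest
    | _, _ => false  -- Python raises IndexError here; excluded by Pre_

def internal_compare_2d_lists_py_alt (l1 : List (List Int)) (l2 : List (List Int)) (index : Int) : Bool :=
  bLoop l1 l2 (PySem.List.pyRange index 0 (-1))

-- ===== PRECONDITION & SPEC =====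
-- Pre_ excludes inputs where A raises IndexError (index beyond a list's length) and all negative
-- indices: there A usually raises, and when it does return False it is via Python's accidental
-- negative-index wraparound — not a behaviour a caller of this row-count recursion relies on.
def Pre_internal_compare_2d_lists_py (l1 : List (List Int)) (l2 : List (List Int)) (index : Int) : Prop :=
  0 ≤ index ∧ index ≤ l1.length ∧ index ≤ l2.length
instance (l1 : List (List Int)) (l2 : List (List Int)) (index : Int) : Decidable (Pre_internal_compare_2d_lists_py l1 l2 index) := by unfold Pre_internal_compare_2d_lists_py; infer_instance

def pvWitness_internal_compare_2d_lists_py : List (List Int) × List (List Int) × Int := ([[1, 2], [3]], [[1, 2], [3]], 2)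

def Spec_internal_compare_2d_lists_py (l1 : List (List Int)) (l2 : List (List Int)) (index : Int) (out : Bool) : Prop := out = internal_compare_2d_lists_py_alt l1 l2 index
instance (l1 : List (List Int)) (l2 : List (List Int)) (index : Int) (out : Bool) : Decidable (Spec_internal_compare_2d_lists_py l1 l2 index out) := by unfold Spec_internal_compare_2d_lists_py; infer_instance

-- ===== CLAIM (what is proved, stated in full; the proofs are below) =====
def Claim_equal_internal_compare_2d_lists_py : Prop := ∀ (l1 : List (List Int)) (l2 : List (List Int)) (index : Int), Dom_internal_compare_2d_lists_py l1 l2 index → Pre_internal_compare_2d_lists_py l1 l2 index → Spec_internal_compare_2d_lists_py l1 l2 index (internal_compare_2d_lists_py l1 l2 index)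

-- ===== LEMMAS AND PROOFS =====

-- A's 1D helper decides equality of the suffixes from k on (for k within the list).
lemma compare1dA_eq (r1 r2 : List Int) (k : Nat) (hk : k ≤ r1.length) :
    compare1dA r1 r2 k = (decide (r1.length = r2.length) && decide (r1.drop k = r2.drop k)) := by
  fun_induction compare1dA r1 r2 k with
  | case1 k hlen => simp [hlen]
  | case2 hlen =>
      have e : r1.length = r2.length := by omega
      simp [e, List.drop_length]
  | case3 k hlen hk' b h1 h2 ih =>
      rw [PySem.List.pyGet?_natCast] at h1 h2
      have hk1 : k < r1.length := (List.getElem?_eq_some_iff.mp h2).1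
      have hk2 : k < r2.length := (List.getElem?_eq_some_iff.mp h1).1
      obtain ⟨_, e1⟩ := List.getElem?_eq_some_iff.mp h2
      obtain ⟨_, e2⟩ := List.getElem?_eq_some_iff.mp h1
      rw [ih (by omega), List.drop_eq_getElem_cons hk1, List.drop_eq_getElem_cons hk2, e1, e2]
      simp
  | case4 k hlen hk' a b h1 h2 hab =>
      rw [PySem.List.pyGet?_natCast] at h1 h2
      have hk1 : k < r1.length := (List.getElem?_eq_some_iff.mp h1).1
      have hk2 : k < r2.length := (List.getElem?_eq_some_iff.mp h2).1
      obtain ⟨_, e1⟩ := List.getElem?_eq_some_iff.mp h1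
      obtain ⟨_, e2⟩ := List.getElem?_eq_some_iff.mp h2
      rw [List.drop_eq_getElem_cons hk1, List.drop_eq_getElem_cons hk2, e1, e2]
      simp [hab]
  | case5 k hlen hk' hno =>
      exfalso
      have hk1 : k < r1.length := by omega
      have hk2 : k < r2.length := by omega
      exact hno r1[k] r2[k]
        (by rw [PySem.List.pyGet?_natCast]; simp [hk1])
        (by rw [PySem.List.pyGet?_natCast]; simp [hk2])

-- B's inlined row test decides the same thing.
lemma rowB_eq (r1 r2 : List Int) :
    ((r1.length != r2.length) || pyAnyNe r1 r2) = !(decide (r1.length = r2.length) && decide (r1 = r2)) := by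
  induction r1 generalizing r2 with
  | nil => cases r2 <;> simp [pyAnyNe]
  | cons a t ih =>
    cases r2 with
    | nil => simp [pyAnyNe]
    | cons b t2 =>
      have := ih t2
      simp only [pyAnyNe, List.zip_cons_cons, List.any_cons] at this ⊢
      by_cases hab : a = b <;> simp [hab, this, Bool.or_comm, Bool.or_left_comm]

-- main loop correspondence, on a Nat row count within both lists
lemma main_eq (l1 l2 : List (List Int)) (n : Nat) (h1 : n ≤ l1.length) (h2 : n ≤ l2.length) :
    internal_compare_2d_lists_py l1 l2 (n : Int) = bLoop l1 l2 (PySem.List.pyRange (n : Int) 0 (-1)) := by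
  induction n with
  | zero =>
      rw [internal_compare_2d_lists_py, PySem.List.pyRange_neg_one_eq_nil (by norm_num)]
      simp [bLoop]
  | succ n ih =>
      have hn1 : n < l1.length := by omega
      have hn2 : n < l2.length := by omega
      have hne : ¬ ((0 : Int) = ((n + 1 : Nat) : Int)) := by push_cast; omega
      have g1 : PySem.List.pyGet? l1 (n : Int) = some l1[n] := by
        rw [PySem.List.pyGet?_natCast]; simp [hn1]
      have g2 : PySem.List.pyGet? l2 (n : Int) = some l2[n] := by
        rw [PySem.List.pyGet?_natCast]; simp [hn2]
      rw [internal_compare_2d_lists_py, if_neg hne,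
          PySem.List.pyRange_neg_one_cons (show (0 : Int) < ((n + 1 : Nat) : Int) by positivity)]
      simp only [bLoop]
      simp only [show ((n + 1 : Nat) : Int) - 1 = (n : Int) from by push_cast; ring]
      have hrow := compare1dA_eq l1[n] l2[n] 0 (by omega)
      simp only [List.drop_zero] at hrow
      by_cases hq : l1[n].length = l2[n].length ∧ l1[n] = l2[n]
      · have hA : compare1dA l2[n] l2[n] 0 = true := by
          rw [compare1dA_eq l2[n] l2[n] 0 (Nat.zero_le _)]; simp
        have hB : pyAnyNe l2[n] l2[n] = false := by simpa using rowB_eq l2[n] l2[n]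
        simp [g1, g2, hq.2, hA, hB, ih (by omega) (by omega)]
      · rcases not_and_or.mp hq with h | h <;> simp [g1, g2, hrow, rowB_eq, h]

-- ===== VERDICT (by name: the statement is the Claim_ definition above) =====
theorem internal_compare_2d_lists_py_spec : Claim_equal_internal_compare_2d_lists_py := by
  intro l1 l2 index _ hpre
  obtain ⟨h0, ha, hb⟩ := hpre
  obtain ⟨n, rfl⟩ := Int.eq_ofNat_of_zero_le h0
  unfold Spec_internal_compare_2d_lists_py internal_compare_2d_lists_py_alt
  exact main_eq l1 l2 n (by exact_mod_cast ha) (by exact_mod_cast hb)
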